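-- pv_equiv track=rewrite | github.com/Lgmrszd/RandomGen | randomcalc.py | findhardlp
-- ===== SOURCE A (Python) =====
-- def hardnext(xold,x0,x1,a,b,c,d):
--     return x0, (a*x0+b*xold+c)%d, (a*x1+b*x0+c)%d
--
-- def findhardlp(a,b,c,d,x0,x1):
--     y0=(a*x1+b*x0+c)%d
--     y1=(a*y0+b*x1+c)%d
--     n=0
--     xold,x0,x1=x0,x1,(a*x1+b*x0+c)%d
--     yold,y0,y1=y0,y1,(a*y1+b*y0+c)%d
--     while (x0!=y0) or (x1!=y1):
--         xold,x0,x1=hardnext(xold, x0, x1, a, b, c, d)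
--         yold,y0,y1=hardnext(yold, y0, y1, a, b, c, d)
--         yold,y0,y1=hardnext(yold, y0, y1, a, b, c, d)
--         n=n+1
--     n=1
--     sxold,sx0,sx1=hardnext(xold, x0, x1, a, b, c, d)
--     while (sx0!=x0) or (sx1!=x1):
--         sxold,sx0,sx1=hardnext(sxold, sx0, sx1, a, b, c, d)
--         n=n+1
--     return n
-- ===== SOURCE B (Python) =====
-- def findhardlp(a, b, c, d, x0, x1):
--     # Brent's cycle-length algorithm on the pair state (u, v) -> (v, (a*v + b*u + c) % d)
--     power = 1
--     lam = 1
--     tortoise = (x0, x1)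
--     hare = (x1, (a * x1 + b * x0 + c) % d)
--     while tortoise != hare:
--         if power == lam:
--             tortoise = hare
--             power *= 2
--             lam = 0
--         hare = (hare[1], (a * hare[1] + b * hare[0] + c) % d)
--         lam += 1
--     return lam
-- ===== Notes on version B (the rewrite author's own statement) =====
-- stated objective: alternative
-- what changed: Cycle-length detection is re-implemented with Brent's algorithm (a fixed tortoise, a hare advanced step by step with a distance counter that teleports the tortoise and doubles the search window) instead of A's Floyd two-speed meeting phase followed by a separate counting walk, using the same pair-state map (u,v) -> (v, (a*v+b*u+c)%d).
import Mathlib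
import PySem

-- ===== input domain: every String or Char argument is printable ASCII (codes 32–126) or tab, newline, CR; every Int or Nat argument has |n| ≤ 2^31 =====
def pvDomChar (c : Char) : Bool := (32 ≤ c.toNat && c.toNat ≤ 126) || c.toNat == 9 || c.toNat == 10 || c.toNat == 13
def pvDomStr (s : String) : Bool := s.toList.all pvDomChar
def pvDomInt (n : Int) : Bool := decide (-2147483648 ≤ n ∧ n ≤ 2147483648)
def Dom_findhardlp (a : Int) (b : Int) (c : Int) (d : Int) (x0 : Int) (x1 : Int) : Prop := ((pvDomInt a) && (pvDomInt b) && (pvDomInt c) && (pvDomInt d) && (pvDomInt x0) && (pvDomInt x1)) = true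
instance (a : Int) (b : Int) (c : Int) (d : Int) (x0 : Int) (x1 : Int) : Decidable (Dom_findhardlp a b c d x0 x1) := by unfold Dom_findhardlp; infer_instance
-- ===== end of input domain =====

-- B re-implements the cycle-length search with Brent's algorithm (one runner advancing at a
-- time inside doubling windows) instead of A's Floyd meeting phase plus a counting walk;
-- same pair-state map and modulus, so both raise exactly on d = 0 (excluded by Pre_).

-- ===== PORT A =====
def hardnext (xold : Int) (x0 : Int) (x1 : Int) (a : Int) (b : Int) (c : Int) (d : Int) :
    Int × Int × Int :=
  (x0, PySem.Int.mod (a*x0 + b*xold + c) d, PySem.Int.mod (a*x1 + b*x0 + c) d)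

-- fuel making the two while-loops total; proved never to run out on Pre_ (see the lemmas)
def pvFuel : Nat := 2^200

-- first while-loop of A (Floyd meeting phase): tortoise one step, hare two steps
def floydLoop (a : Int) (b : Int) (c : Int) (d : Int) :
    Nat → Int × Int × Int → Int × Int × Int → Int → (Int × Int × Int) × Int
  | 0, xt, _, n => (xt, n)
  | fuel+1, xt, yt, n =>
    if xt.2.1 ≠ yt.2.1 ∨ xt.2.2 ≠ yt.2.2 then
      floydLoop a b c d fuel (hardnext xt.1 xt.2.1 xt.2.2 a b c d)
        (hardnext (hardnext yt.1 yt.2.1 yt.2.2 a b c d).1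
          (hardnext yt.1 yt.2.1 yt.2.2 a b c d).2.1
          (hardnext yt.1 yt.2.1 yt.2.2 a b c d).2.2 a b c d)
        (n+1)
    else (xt, n)

-- second while-loop of A: walk once around the cycle counting steps
def countLoop (a : Int) (b : Int) (c : Int) (d : Int) :
    Nat → Int × Int → Int × Int × Int → Int → Int
  | 0, _, _, n => n
  | fuel+1, tgt, st, n =>
    if st.2.1 ≠ tgt.1 ∨ st.2.2 ≠ tgt.2 then
      countLoop a b c d fuel tgt (hardnext st.1 st.2.1 st.2.2 a b c d) (n+1)
    else n

def findhardlp (a : Int) (b : Int) (c : Int) (d : Int) (x0 : Int) (x1 : Int) : Int :=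
  let y0 := PySem.Int.mod (a*x1 + b*x0 + c) d
  let y1 := PySem.Int.mod (a*y0 + b*x1 + c) d
  let xt : Int × Int × Int := (x0, x1, PySem.Int.mod (a*x1 + b*x0 + c) d)
  let yt : Int × Int × Int := (y0, y1, PySem.Int.mod (a*y1 + b*y0 + c) d)
  let t := (floydLoop a b c d pvFuel xt yt 0).1
  countLoop a b c d pvFuel (t.2.1, t.2.2) (hardnext t.1 t.2.1 t.2.2 a b c d) 1

-- ===== PORT B =====
-- Brent's algorithm: tortoise fixed, hare advances with distance counter lam; when
-- lam reaches the current window size power, teleport the tortoise and double power.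
def brentLoop (a : Int) (b : Int) (c : Int) (d : Int) :
    Nat → Int → Int → Int × Int → Int × Int → Int
  | 0, _, lam, _, _ => lam
  | fuel+1, power, lam, tort, hare =>
    if tort ≠ hare then
      if power = lam then
        brentLoop a b c d fuel (power*2) 1 hare
          (hare.2, PySem.Int.mod (a*hare.2 + b*hare.1 + c) d)
      else
        brentLoop a b c d fuel power (lam+1) tort
          (hare.2, PySem.Int.mod (a*hare.2 + b*hare.1 + c) d)
    else lam

def findhardlp_alt (a : Int) (b : Int) (c : Int) (d : Int) (x0 : Int) (x1 : Int) : Int :=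
  brentLoop a b c d pvFuel 1 1 (x0, x1) (x1, PySem.Int.mod (a*x1 + b*x0 + c) d)

-- ===== PRECONDITION & SPEC =====
-- Pre_ excludes exactly d = 0, where Python's '%' raises ZeroDivisionError in both programs.
def Pre_findhardlp (a : Int) (b : Int) (c : Int) (d : Int) (x0 : Int) (x1 : Int) : Prop :=
  d ≠ 0
instance (a : Int) (b : Int) (c : Int) (d : Int) (x0 : Int) (x1 : Int) :
    Decidable (Pre_findhardlp a b c d x0 x1) := by unfold Pre_findhardlp; infer_instance

def pvWitness_findhardlp : Int × Int × Int × Int × Int × Int := (1, 1, 1, 5, 0, 1)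

def Spec_findhardlp (a : Int) (b : Int) (c : Int) (d : Int) (x0 : Int) (x1 : Int) (out : Int) : Prop := out = findhardlp_alt a b c d x0 x1
instance (a : Int) (b : Int) (c : Int) (d : Int) (x0 : Int) (x1 : Int) (out : Int) : Decidable (Spec_findhardlp a b c d x0 x1 out) := by unfold Spec_findhardlp; infer_instance

-- ===== CLAIM (what is proved, stated in full; the proofs are below) =====
def Claim_equal_findhardlp : Prop := ∀ (a : Int) (b : Int) (c : Int) (d : Int) (x0 : Int) (x1 : Int), Dom_findhardlp a b c d x0 x1 → Pre_findhardlp a b c d x0 x1 → Spec_findhardlp a b c d x0 x1 (findhardlp a b c d x0 x1)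

-- ===== LEMMAS AND PROOFS =====

-- the one-step map on the pair state (u, v) ↦ (v, (a*v + b*u + c) % d)
def pvF (a : Int) (b : Int) (c : Int) (d : Int) (p : Int × Int) : Int × Int :=
  (p.2, PySem.Int.mod (a*p.2 + b*p.1 + c) d)

-- A's loop state: the triple (u, v, w) kept by A is (p.1, pvF p) for the pair p it lags behind
def pvTrip (a : Int) (b : Int) (c : Int) (d : Int) (p : Int × Int) : Int × Int × Int :=
  (p.1, pvF a b c d p)

-- the orbit of the start pair
def pvS (a : Int) (b : Int) (c : Int) (d : Int) (x0 : Int) (x1 : Int) (k : Nat) : Int × Int :=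
  (pvF a b c d)^[k] (x0, x1)

theorem pvS_succ (a b c d x0 x1 : Int) (k : Nat) :
    pvS a b c d x0 x1 (k+1) = pvF a b c d (pvS a b c d x0 x1 k) :=
  Function.iterate_succ_apply' _ _ _

theorem pvS_shift (a b c d x0 x1 : Int) (m k : Nat) (h : k ≤ m) :
    pvS a b c d x0 x1 m = (pvF a b c d)^[m - k] (pvS a b c d x0 x1 k) := by
  unfold pvS
  rw [← Function.iterate_add_apply]
  congr 1
  omega

theorem hardnext_trip (a b c d : Int) (p : Int × Int) :
    hardnext (pvTrip a b c d p).1 (pvTrip a b c d p).2.1 (pvTrip a b c d p).2.2 a b c d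
      = pvTrip a b c d (pvF a b c d p) := rfl

theorem trip_snd (a b c d : Int) (p : Int × Int) :
    (pvTrip a b c d p).2 = pvF a b c d p := rfl

-- two periodic points on the same orbit have the same minimal period
theorem mp_orbit_le (a b c d x0 x1 : Int) (i j : Nat) (hij : i ≤ j)
    (hi : pvS a b c d x0 x1 i ∈ Function.periodicPts (pvF a b c d)) :
    Function.minimalPeriod (pvF a b c d) (pvS a b c d x0 x1 j)
      = Function.minimalPeriod (pvF a b c d) (pvS a b c d x0 x1 i) := by
  rw [pvS_shift a b c d x0 x1 j i hij]
  exact Function.minimalPeriod_apply_iterate hi _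

theorem mp_orbit (a b c d x0 x1 : Int) (i j : Nat)
    (hi : pvS a b c d x0 x1 i ∈ Function.periodicPts (pvF a b c d))
    (hj : pvS a b c d x0 x1 j ∈ Function.periodicPts (pvF a b c d)) :
    Function.minimalPeriod (pvF a b c d) (pvS a b c d x0 x1 i)
      = Function.minimalPeriod (pvF a b c d) (pvS a b c d x0 x1 j) := by
  rcases le_total i j with h | h
  · exact (mp_orbit_le a b c d x0 x1 i j h hi).symm
  · exact mp_orbit_le a b c d x0 x1 j i h hj

-- Floyd meeting phase: from (tortoise, hare) = (T n, T (2n+2)) the loop exits at some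
-- triple T m with S (m+1) = S (2m+3), provided a meeting exists within fuel.
theorem floyd_ok (a b c d x0 x1 : Int) : ∀ (fuel n : Nat) (nn : Int),
    (∃ e : Nat, n ≤ e ∧ e ≤ n + fuel ∧
      pvS a b c d x0 x1 (e+1) = pvS a b c d x0 x1 (2*e+3)) →
    ∃ m : Nat,
      (floydLoop a b c d fuel (pvTrip a b c d (pvS a b c d x0 x1 n))
          (pvTrip a b c d (pvS a b c d x0 x1 (2*n+2))) nn).1
        = pvTrip a b c d (pvS a b c d x0 x1 m) ∧
      pvS a b c d x0 x1 (m+1) = pvS a b c d x0 x1 (2*m+3) := by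
  intro fuel
  induction fuel with
  | zero =>
    intro n nn hex
    obtain ⟨e, h1, h2, h3⟩ := hex
    have he : e = n := by omega
    subst he
    exact ⟨e, rfl, h3⟩
  | succ fuel ih =>
    intro n nn hex
    have hx2 : (pvTrip a b c d (pvS a b c d x0 x1 n)).2 = pvS a b c d x0 x1 (n+1) := by
      rw [trip_snd, ← pvS_succ]
    have hy2 : (pvTrip a b c d (pvS a b c d x0 x1 (2*n+2))).2 = pvS a b c d x0 x1 (2*n+3) := by
      rw [trip_snd, ← pvS_succ]
    by_cases hmeet : pvS a b c d x0 x1 (n+1) = pvS a b c d x0 x1 (2*n+3)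
    · refine ⟨n, ?_, hmeet⟩
      show (floydLoop a b c d (fuel+1) _ _ nn).1 = _
      rw [floydLoop, if_neg]
      push_neg
      constructor
      · rw [show (pvTrip a b c d (pvS a b c d x0 x1 n)).2.1
              = (pvS a b c d x0 x1 (n+1)).1 by rw [← hx2],
            show (pvTrip a b c d (pvS a b c d x0 x1 (2*n+2))).2.1
              = (pvS a b c d x0 x1 (2*n+3)).1 by rw [← hy2], hmeet]
      · rw [show (pvTrip a b c d (pvS a b c d x0 x1 n)).2.2
              = (pvS a b c d x0 x1 (n+1)).2 by rw [← hx2],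
            show (pvTrip a b c d (pvS a b c d x0 x1 (2*n+2))).2.2
              = (pvS a b c d x0 x1 (2*n+3)).2 by rw [← hy2], hmeet]
    · have hcond : (pvTrip a b c d (pvS a b c d x0 x1 n)).2.1
            ≠ (pvTrip a b c d (pvS a b c d x0 x1 (2*n+2))).2.1 ∨
          (pvTrip a b c d (pvS a b c d x0 x1 n)).2.2
            ≠ (pvTrip a b c d (pvS a b c d x0 x1 (2*n+2))).2.2 := by
        by_contra hc
        push_neg at hc
        apply hmeet
        have := Prod.ext hc.1 hc.2
        rw [hx2, hy2] at this
        exact this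
      rw [floydLoop, if_pos hcond]
      have hstep1 : hardnext (pvTrip a b c d (pvS a b c d x0 x1 n)).1
          (pvTrip a b c d (pvS a b c d x0 x1 n)).2.1
          (pvTrip a b c d (pvS a b c d x0 x1 n)).2.2 a b c d
          = pvTrip a b c d (pvS a b c d x0 x1 (n+1)) := by
        rw [hardnext_trip, ← pvS_succ]
      have hstep2 : hardnext
          (hardnext (pvTrip a b c d (pvS a b c d x0 x1 (2*n+2))).1
            (pvTrip a b c d (pvS a b c d x0 x1 (2*n+2))).2.1
            (pvTrip a b c d (pvS a b c d x0 x1 (2*n+2))).2.2 a b c d).1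
          (hardnext (pvTrip a b c d (pvS a b c d x0 x1 (2*n+2))).1
            (pvTrip a b c d (pvS a b c d x0 x1 (2*n+2))).2.1
            (pvTrip a b c d (pvS a b c d x0 x1 (2*n+2))).2.2 a b c d).2.1
          (hardnext (pvTrip a b c d (pvS a b c d x0 x1 (2*n+2))).1
            (pvTrip a b c d (pvS a b c d x0 x1 (2*n+2))).2.1
            (pvTrip a b c d (pvS a b c d x0 x1 (2*n+2))).2.2 a b c d).2.2 a b c d
          = pvTrip a b c d (pvS a b c d x0 x1 (2*(n+1)+2)) := by
        rw [hardnext_trip, hardnext_trip, ← pvS_succ, ← pvS_succ,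
          show 2*n+2+1+1 = 2*(n+1)+2 by omega]
      rw [hstep1, hstep2]
      apply ih (n+1)
      obtain ⟨e, h1, h2, h3⟩ := hex
      have hne : e ≠ n := by
        intro h
        subst h
        exact hmeet h3
      exact ⟨e, by omega, by omega, h3⟩

-- A's counting phase computes the minimal period of the (periodic) meeting point.
theorem count_ok (a b c d x0 x1 : Int) (m : Nat)
    (hmem : pvS a b c d x0 x1 m ∈ Function.periodicPts (pvF a b c d)) :
    ∀ (fuel k : Nat),
    (∀ i : Nat, 1 ≤ i → i ≤ k →
      (pvF a b c d)^[i] (pvS a b c d x0 x1 m) ≠ pvS a b c d x0 x1 m) →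
    Function.minimalPeriod (pvF a b c d) (pvS a b c d x0 x1 m) ≤ k + 1 + fuel →
    countLoop a b c d fuel (pvS a b c d x0 x1 m)
        (pvTrip a b c d (pvS a b c d x0 x1 (m+k))) ((k : Int)+1)
      = (Function.minimalPeriod (pvF a b c d) (pvS a b c d x0 x1 m) : Int) := by
  have hQpos := Function.minimalPeriod_pos_of_mem_periodicPts hmem
  have hQit := Function.iterate_minimalPeriod
    (f := pvF a b c d) (x := pvS a b c d x0 x1 m)
  intro fuel
  induction fuel with
  | zero =>
    intro k hno hle
    have hk : Function.minimalPeriod (pvF a b c d) (pvS a b c d x0 x1 m) = k + 1 := by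
      rcases Nat.lt_or_ge (Function.minimalPeriod (pvF a b c d) (pvS a b c d x0 x1 m))
        (k+1) with h | h
      · exact absurd hQit (hno _ hQpos (by omega))
      · omega
    rw [countLoop, hk]
    push_cast
    ring
  | succ fuel ih =>
    intro k hno hle
    have hcur : (pvTrip a b c d (pvS a b c d x0 x1 (m+k))).2
        = (pvF a b c d)^[k+1] (pvS a b c d x0 x1 m) := by
      rw [trip_snd, ← pvS_succ, pvS_shift a b c d x0 x1 (m+k+1) m (by omega),
        show m+k+1-m = k+1 by omega]
    by_cases hmeet : (pvF a b c d)^[k+1] (pvS a b c d x0 x1 m) = pvS a b c d x0 x1 m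
    · have hk : Function.minimalPeriod (pvF a b c d) (pvS a b c d x0 x1 m) = k + 1 := by
        have hdvd : Function.minimalPeriod (pvF a b c d) (pvS a b c d x0 x1 m) ∣ k + 1 :=
          Function.IsPeriodicPt.minimalPeriod_dvd hmeet
        have hle' := Nat.le_of_dvd (by omega) hdvd
        rcases Nat.lt_or_ge (Function.minimalPeriod (pvF a b c d) (pvS a b c d x0 x1 m))
          (k+1) with h | h
        · exact absurd hQit (hno _ hQpos (by omega))
        · omega
      rw [countLoop, if_neg]
      · rw [hk]; push_cast; ring
      · push_neg
        constructor
        · rw [show (pvTrip a b c d (pvS a b c d x0 x1 (m+k))).2.1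
              = ((pvF a b c d)^[k+1] (pvS a b c d x0 x1 m)).1 by rw [← hcur], hmeet]
        · rw [show (pvTrip a b c d (pvS a b c d x0 x1 (m+k))).2.2
              = ((pvF a b c d)^[k+1] (pvS a b c d x0 x1 m)).2 by rw [← hcur], hmeet]
    · have hcond : (pvTrip a b c d (pvS a b c d x0 x1 (m+k))).2.1
            ≠ (pvS a b c d x0 x1 m).1 ∨
          (pvTrip a b c d (pvS a b c d x0 x1 (m+k))).2.2 ≠ (pvS a b c d x0 x1 m).2 := by
        by_contra hc
        push_neg at hc
        apply hmeet
        have := Prod.ext hc.1 hc.2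
        rw [hcur] at this
        exact this
      rw [countLoop, if_pos hcond]
      have hstep : hardnext (pvTrip a b c d (pvS a b c d x0 x1 (m+k))).1
          (pvTrip a b c d (pvS a b c d x0 x1 (m+k))).2.1
          (pvTrip a b c d (pvS a b c d x0 x1 (m+k))).2.2 a b c d
          = pvTrip a b c d (pvS a b c d x0 x1 (m+(k+1))) := by
        rw [hardnext_trip, ← pvS_succ, show m+k+1 = m+(k+1) by omega]
      rw [hstep, show ((k : Int)+1)+1 = ((k+1 : Nat) : Int)+1 by push_cast; ring]
      apply ih (k+1)
      · intro i hi1 hi2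
        rcases Nat.lt_or_ge i (k+1) with h | h
        · exact hno i hi1 (by omega)
        · have : i = k+1 := by omega
          subst this
          exact hmeet
      · omega

-- if the hare has met the fixed tortoise at distance L, then L is the minimal period
theorem brent_exit (a b c d x0 x1 : Int) (μ j L : Nat)
    (hμ : pvS a b c d x0 x1 μ ∈ Function.periodicPts (pvF a b c d))
    (hL1 : 1 ≤ L)
    (hm : (pvF a b c d)^[L] (pvS a b c d x0 x1 j) = pvS a b c d x0 x1 j)
    (hno : ∀ i : Nat, 1 ≤ i → i < L →
      (pvF a b c d)^[i] (pvS a b c d x0 x1 j) ≠ pvS a b c d x0 x1 j) :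
    L = Function.minimalPeriod (pvF a b c d) (pvS a b c d x0 x1 μ) := by
  have hmem : pvS a b c d x0 x1 j ∈ Function.periodicPts (pvF a b c d) :=
    Function.mk_mem_periodicPts (by omega) hm
  have hQpos := Function.minimalPeriod_pos_of_mem_periodicPts hmem
  have hdvd := Function.IsPeriodicPt.minimalPeriod_dvd hm
  have hle := Nat.le_of_dvd (by omega) hdvd
  have hge : L ≤ Function.minimalPeriod (pvF a b c d) (pvS a b c d x0 x1 j) := by
    by_contra h
    push_neg at h
    exact hno _ hQpos h Function.iterate_minimalPeriod
  rw [← mp_orbit a b c d x0 x1 j μ hmem hμ]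
  omega

-- if the hare has NOT met the tortoise, the loop state is strictly below its exit bound
theorem brent_bound (a b c d x0 x1 : Int) (μ R r L : Nat)
    (hμ : pvS a b c d x0 x1 μ ∈ Function.periodicPts (pvF a b c d))
    (hRfin : μ + 1 ≤ 2^R ∧
      Function.minimalPeriod (pvF a b c d) (pvS a b c d x0 x1 μ) ≤ 2^R)
    (hL1 : 1 ≤ L) (hLp : L ≤ 2^r) (hrR : r ≤ R)
    (hnm : (pvF a b c d)^[L] (pvS a b c d x0 x1 (2^r - 1)) ≠ pvS a b c d x0 x1 (2^r - 1))
    (hno : ∀ i : Nat, 1 ≤ i → i < L →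
      (pvF a b c d)^[i] (pvS a b c d x0 x1 (2^r - 1)) ≠ pvS a b c d x0 x1 (2^r - 1)) :
    2 * 2^r + L + 1
      ≤ 2 * 2^R + Function.minimalPeriod (pvF a b c d) (pvS a b c d x0 x1 μ) := by
  have hΛpos := Function.minimalPeriod_pos_of_mem_periodicPts hμ
  rcases eq_or_lt_of_le hrR with he | h
  · subst he
    have hμle : μ ≤ 2^r - 1 := by
      have := hRfin.1
      omega
    have hjmem : pvS a b c d x0 x1 (2^r - 1) ∈ Function.periodicPts (pvF a b c d) := by
      rw [pvS_shift a b c d x0 x1 (2^r - 1) μ hμle]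
      rw [Function.mem_periodicPts] at hμ ⊢
      obtain ⟨n, hn, hper⟩ := hμ
      exact ⟨n, hn, hper.apply_iterate _⟩
    have hmpj : Function.minimalPeriod (pvF a b c d) (pvS a b c d x0 x1 (2^r - 1))
        = Function.minimalPeriod (pvF a b c d) (pvS a b c d x0 x1 μ) :=
      mp_orbit a b c d x0 x1 (2^r - 1) μ hjmem hμ
    have hjit : (pvF a b c d)^[Function.minimalPeriod (pvF a b c d)
        (pvS a b c d x0 x1 μ)] (pvS a b c d x0 x1 (2^r - 1))
        = pvS a b c d x0 x1 (2^r - 1) := by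
      rw [← hmpj]
      exact Function.iterate_minimalPeriod
    have hLle : L ≤ Function.minimalPeriod (pvF a b c d) (pvS a b c d x0 x1 μ) := by
      by_contra hcon
      push_neg at hcon
      exact hno _ hΛpos hcon hjit
    have hLne : L ≠ Function.minimalPeriod (pvF a b c d) (pvS a b c d x0 x1 μ) := by
      intro hcon
      rw [hcon] at hnm
      exact hnm hjit
    omega
  · have h1 : 2^(r+1) ≤ 2^R := Nat.pow_le_pow_right (by omega) (by omega)
    have h2 : (1:Nat) ≤ 2^r := Nat.one_le_two_pow
    have h3 : (2:Nat)^(r+1) = 2 * 2^r := by rw [pow_succ]; ring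
    omega

-- Brent's phase: returns the minimal period of the orbit's periodic points.
theorem brent_ok (a b c d x0 x1 : Int) (μ R : Nat)
    (hμ : pvS a b c d x0 x1 μ ∈ Function.periodicPts (pvF a b c d))
    (hRfin : μ + 1 ≤ 2^R ∧
      Function.minimalPeriod (pvF a b c d) (pvS a b c d x0 x1 μ) ≤ 2^R)
    (hRmin : ∀ r' : Nat, r' < R → ¬(μ + 1 ≤ 2^r' ∧
      Function.minimalPeriod (pvF a b c d) (pvS a b c d x0 x1 μ) ≤ 2^r')) :
    ∀ (fuel r L : Nat), 1 ≤ L → L ≤ 2^r → r ≤ R →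
    (∀ i : Nat, 1 ≤ i → i < L →
      (pvF a b c d)^[i] (pvS a b c d x0 x1 (2^r - 1)) ≠ pvS a b c d x0 x1 (2^r - 1)) →
    2 * 2^R + Function.minimalPeriod (pvF a b c d) (pvS a b c d x0 x1 μ) + 1
      ≤ 2 * 2^r + L + fuel →
    brentLoop a b c d fuel ((2 : Int)^r) ((L : Nat) : Int)
        (pvS a b c d x0 x1 (2^r - 1)) (pvS a b c d x0 x1 (2^r - 1 + L))
      = ((Function.minimalPeriod (pvF a b c d) (pvS a b c d x0 x1 μ) : Nat) : Int) := by
  have hΛpos := Function.minimalPeriod_pos_of_mem_periodicPts hμ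
  intro fuel
  induction fuel with
  | zero =>
    intro r L hL1 hLp hrR hno hfuel
    by_cases hm : (pvF a b c d)^[L] (pvS a b c d x0 x1 (2^r - 1))
        = pvS a b c d x0 x1 (2^r - 1)
    · rw [brentLoop]
      exact_mod_cast congrArg (Nat.cast : Nat → Int)
        (brent_exit a b c d x0 x1 μ (2^r - 1) L hμ hL1 hm hno)
    · exfalso
      have := brent_bound a b c d x0 x1 μ R r L hμ hRfin hL1 hLp hrR hm hno
      omega
  | succ fuel ih =>
    intro r L hL1 hLp hrR hno hfuel
    have hhare : pvS a b c d x0 x1 (2^r - 1 + L)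
        = (pvF a b c d)^[L] (pvS a b c d x0 x1 (2^r - 1)) := by
      rw [pvS_shift a b c d x0 x1 (2^r - 1 + L) (2^r - 1) (by omega),
        show 2^r - 1 + L - (2^r - 1) = L by omega]
    by_cases hm : (pvF a b c d)^[L] (pvS a b c d x0 x1 (2^r - 1))
        = pvS a b c d x0 x1 (2^r - 1)
    · rw [brentLoop, if_neg]
      · exact_mod_cast congrArg (Nat.cast : Nat → Int)
          (brent_exit a b c d x0 x1 μ (2^r - 1) L hμ hL1 hm hno)
      · rw [hhare, hm]
        exact fun hcon => hcon rfl
    · have hcond : pvS a b c d x0 x1 (2^r - 1)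
          ≠ pvS a b c d x0 x1 (2^r - 1 + L) := by
        rw [hhare]
        exact fun hcon => hm hcon.symm
      rw [brentLoop, if_pos hcond]
      have hpvF : ∀ p : Int × Int,
          (p.2, PySem.Int.mod (a*p.2 + b*p.1 + c) d) = pvF a b c d p := fun _ => rfl
      have hbnd := brent_bound a b c d x0 x1 μ R r L hμ hRfin hL1 hLp hrR hm hno
      by_cases hpl : (2 : Int)^r = ((L : Nat) : Int)
      · -- teleport the tortoise and double the window
        have hLr : L = 2^r := by
          have : ((2^r : Nat) : Int) = ((L : Nat) : Int) := by push_cast; exact hpl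
          exact_mod_cast this.symm
        have hrlt : r < R := by
          rcases eq_or_lt_of_le hrR with he | h
          · exfalso
            subst he
            have := hRfin.2
            omega
          · exact h
        rw [if_pos hpl]
        have h2r : (1:Nat) ≤ 2^r := Nat.one_le_two_pow
        have hidx : 2^r - 1 + L = 2^(r+1) - 1 := by
          rw [hLr, pow_succ]
          omega
        have hpow : (2 : Int)^r * 2 = (2 : Int)^(r+1) := (pow_succ 2 r).symm
        have hone : (1 : Int) = ((1 : Nat) : Int) := by norm_num
        rw [hpow, hone, hidx, hpvF, ← pvS_succ]
        apply ih (r+1) 1 (le_refl 1) Nat.one_le_two_pow (by omega)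
        · intro i hi1 hi2
          omega
        · have h3 : (2:Nat)^(r+1) = 2 * 2^r := by rw [pow_succ]; ring
          omega
      · -- advance the hare one step, increasing the distance counter
        rw [if_neg hpl]
        have hLlt : L < 2^r := by
          rcases lt_or_eq_of_le hLp with h | h
          · exact h
          · exfalso
            apply hpl
            rw [h]
            push_cast
            ring
        have hcast : ((L : Nat) : Int) + 1 = (((L+1 : Nat)) : Int) := by push_cast; ring
        rw [hcast, hpvF, ← pvS_succ, show 2^r - 1 + L + 1 = 2^r - 1 + (L+1) by omega]
        apply ih r (L+1) (by omega) (by omega) hrR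
        · intro i hi1 hi2
          rcases Nat.lt_or_ge i L with h | h
          · exact hno i hi1 h
          · have : i = L := by omega
            subst this
            exact hm
        · omega

-- every orbit of the mod-d map reaches a periodic point within 2^64 + 2 steps
set_option maxRecDepth 10000 in
theorem exists_periodic (a b c d x0 x1 : Int) (hd : d ≠ 0)
    (hdom : Dom_findhardlp a b c d x0 x1) :
    ∃ μ : Nat, μ ≤ 2^64 + 2 ∧
      pvS a b c d x0 x1 μ ∈ Function.periodicPts (pvF a b c d) ∧
      Function.minimalPeriod (pvF a b c d) (pvS a b c d x0 x1 μ) ≤ 2^64 := by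
  have hdle : -2147483648 ≤ d ∧ d ≤ 2147483648 := by
    simp only [Dom_findhardlp, pvDomInt, Bool.and_eq_true, decide_eq_true_eq] at hdom
    exact hdom.1.1.2
  have hmod : ∀ x : Int,
      PySem.Int.mod x d ∈ Finset.Ico (-2147483648 : Int) 2147483648 := by
    intro x
    rcases lt_or_gt_of_ne hd with h | h
    · have hb := PySem.Int.mod_neg_bounds (a := x) h
      simp only [Finset.mem_Ico]
      omega
    · have h1 := PySem.Int.mod_nonneg (a := x) h
      have h2 := PySem.Int.mod_lt (a := x) h
      simp only [Finset.mem_Ico]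
      omega
  set B : Finset (Int × Int) := (Finset.Ico (-2147483648 : Int) 2147483648) ×ˢ
    (Finset.Ico (-2147483648 : Int) 2147483648) with hB
  clear_value B
  have hmem2 : ∀ k : Nat, pvS a b c d x0 x1 (k+2) ∈ B := by
    intro k
    have h1 : pvS a b c d x0 x1 (k+2)
        = pvF a b c d (pvF a b c d (pvS a b c d x0 x1 k)) := by
      rw [pvS_succ, pvS_succ]
    rw [h1]
    rw [hB]
    simp only [pvF, Finset.mem_product]
    exact ⟨hmod _, hmod _⟩
  have hcard : B.card = 2^64 := by
    rw [hB, Finset.card_product, Int.card_Ico]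
    decide
  obtain ⟨i, -, j, -, hne, heq⟩ :=
    Finset.exists_ne_map_eq_of_card_lt_of_maps_to
      (s := (Finset.univ : Finset (Fin (2^64+1))))
      (t := B)
      (f := fun k : Fin (2^64+1) => pvS a b c d x0 x1 ((k : Nat)+2))
      (by rw [hcard, Finset.card_univ, Fintype.card_fin]; omega)
      (fun k _ => hmem2 (k : Nat))
  have hvne : (i : Nat) ≠ (j : Nat) := fun h => hne (Fin.ext h)
  have key : ∀ p q : Nat, p < q → q ≤ 2^64 →
      pvS a b c d x0 x1 (p+2) = pvS a b c d x0 x1 (q+2) →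
      ∃ μ : Nat, μ ≤ 2^64 + 2 ∧
        pvS a b c d x0 x1 μ ∈ Function.periodicPts (pvF a b c d) ∧
        Function.minimalPeriod (pvF a b c d) (pvS a b c d x0 x1 μ) ≤ 2^64 := by
    intro p q hpq hq heq'
    have hper : Function.IsPeriodicPt (pvF a b c d) (q-p) (pvS a b c d x0 x1 (p+2)) := by
      show (pvF a b c d)^[q-p] (pvS a b c d x0 x1 (p+2)) = pvS a b c d x0 x1 (p+2)
      have h1 : pvS a b c d x0 x1 (q+2)
          = (pvF a b c d)^[q-p] (pvS a b c d x0 x1 (p+2)) := by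
        rw [pvS_shift a b c d x0 x1 (q+2) (p+2) (by omega),
          show q+2-(p+2) = q-p by omega]
      rw [← h1, ← heq']
    refine ⟨p+2, by omega, Function.mk_mem_periodicPts (by omega) hper, ?_⟩
    have := Function.IsPeriodicPt.minimalPeriod_le (n := q-p) (by omega) hper
    omega
  rcases Nat.lt_or_ge (i : Nat) (j : Nat) with h | h
  · exact key (i : Nat) (j : Nat) h (by omega) heq
  · have h' : (j : Nat) < (i : Nat) := by omega
    exact key (j : Nat) (i : Nat) h' (by omega) heq.symm

-- ===== VERDICT (by name: the statement is the Claim_ definition above) =====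
theorem findhardlp_spec : Claim_equal_findhardlp := by
  unfold Claim_equal_findhardlp
  intro a b c d x0 x1 hdom hpre
  unfold Pre_findhardlp at hpre
  unfold Spec_findhardlp
  obtain ⟨μ, hμle, hμmem, hΛle⟩ := exists_periodic a b c d x0 x1 hpre hdom
  have hΛpos := Function.minimalPeriod_pos_of_mem_periodicPts hμmem
  -- ===== B side: Brent's loop returns the minimal period =====
  have hex66 : ∃ rr : Nat, μ + 1 ≤ 2^rr ∧
      Function.minimalPeriod (pvF a b c d) (pvS a b c d x0 x1 μ) ≤ 2^rr := by
    refine ⟨66, ?_, ?_⟩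
    · have h1 : (2:Nat)^64 + 3 ≤ 2^66 := by norm_num
      omega
    · have h1 : (2:Nat)^64 ≤ 2^66 := by norm_num
      omega
  have hRle : Nat.find hex66 ≤ 66 := Nat.find_le (by
    refine ⟨?_, ?_⟩
    · have h1 : (2:Nat)^64 + 3 ≤ 2^66 := by norm_num
      omega
    · have h1 : (2:Nat)^64 ≤ 2^66 := by norm_num
      omega)
  have hb := brent_ok a b c d x0 x1 μ (Nat.find hex66) hμmem (Nat.find_spec hex66)
      (fun r' hr' => Nat.find_min hex66 hr') pvFuel 0 1 (le_refl 1)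
      Nat.one_le_two_pow (Nat.zero_le _)
      (by intro i h1 h2; omega)
      (by
        have h1 : (2:Nat)^(Nat.find hex66) ≤ 2^66 :=
          Nat.pow_le_pow_right (by omega) hRle
        have h2 : (2:Nat)^64 ≤ 2^66 := by norm_num
        have h3 : 2*(2:Nat)^66 + 2^66 + 1 ≤ 2 * 2^0 + 1 + pvFuel := by
          unfold pvFuel
          norm_num
        omega)
  have hS0 : pvS a b c d x0 x1 (2^0-1) = (x0, x1) := rfl
  have hS1 : pvS a b c d x0 x1 (2^0-1+1)
      = (x1, PySem.Int.mod (a*x1 + b*x0 + c) d) := rfl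
  have h20 : ((2:Int)^0) = 1 := by norm_num
  have h11 : (((1:Nat)) : Int) = 1 := by norm_num
  rw [hS0, hS1, h20, h11] at hb
  have hB : findhardlp_alt a b c d x0 x1
      = ((Function.minimalPeriod (pvF a b c d) (pvS a b c d x0 x1 μ) : Nat) : Int) := by
    unfold findhardlp_alt
    exact hb
  -- ===== A side: Floyd meeting + counting walk returns the minimal period =====
  have hEμ : μ + 2 ≤ Function.minimalPeriod (pvF a b c d) (pvS a b c d x0 x1 μ) * (μ+2) :=
    Nat.le_mul_of_pos_left (μ+2) hΛpos
  have hEbound : Function.minimalPeriod (pvF a b c d) (pvS a b c d x0 x1 μ) * (μ+2)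
      ≤ 2^64 * (2^64 + 4) := Nat.mul_le_mul hΛle (by omega)
  have hper : Function.IsPeriodicPt (pvF a b c d)
      (Function.minimalPeriod (pvF a b c d) (pvS a b c d x0 x1 μ) * (μ+2))
      (pvS a b c d x0 x1 μ) :=
    (Function.isPeriodicPt_minimalPeriod _ _).mul_const (μ+2)
  have hmeet : ∀ e : Nat,
      e + 2 = Function.minimalPeriod (pvF a b c d) (pvS a b c d x0 x1 μ) * (μ+2) →
      pvS a b c d x0 x1 (e+1) = pvS a b c d x0 x1 (2*e+3) := by
    intro e he
    have h2 : pvS a b c d x0 x1 (e+1)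
        = (pvF a b c d)^[e+1-μ] (pvS a b c d x0 x1 μ) :=
      pvS_shift a b c d x0 x1 (e+1) μ (by omega)
    have h1 : pvS a b c d x0 x1 (2*e+3)
        = (pvF a b c d)^[e+2] (pvS a b c d x0 x1 (e+1)) := by
      rw [pvS_shift a b c d x0 x1 (2*e+3) (e+1) (by omega),
        show 2*e+3-(e+1) = e+2 by omega]
    rw [h1]
    symm
    calc (pvF a b c d)^[e+2] (pvS a b c d x0 x1 (e+1))
        = (pvF a b c d)^[e+2] ((pvF a b c d)^[e+1-μ] (pvS a b c d x0 x1 μ)) := by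
          rw [← h2]
      _ = (pvF a b c d)^[(e+1-μ)+(e+2)] (pvS a b c d x0 x1 μ) := by
          rw [← Function.iterate_add_apply, Nat.add_comm]
      _ = (pvF a b c d)^[e+1-μ] ((pvF a b c d)^[e+2] (pvS a b c d x0 x1 μ)) :=
          Function.iterate_add_apply _ _ _ _
      _ = (pvF a b c d)^[e+1-μ] (pvS a b c d x0 x1 μ) := by
          rw [show e+2 = Function.minimalPeriod (pvF a b c d)
            (pvS a b c d x0 x1 μ) * (μ+2) from he, hper]
      _ = pvS a b c d x0 x1 (e+1) := h2.symm
  obtain ⟨m, hm1, hm2⟩ := floyd_ok a b c d x0 x1 pvFuel 0 0 (by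
    refine ⟨Function.minimalPeriod (pvF a b c d) (pvS a b c d x0 x1 μ) * (μ+2) - 2,
      by omega, ?_, hmeet _ (by omega)⟩
    have hfb : (2:Nat)^64 * (2^64 + 4) ≤ pvFuel := by
      unfold pvFuel
      norm_num
    omega)
  have hperm : Function.IsPeriodicPt (pvF a b c d) (m+2) (pvS a b c d x0 x1 (m+1)) := by
    show (pvF a b c d)^[m+2] (pvS a b c d x0 x1 (m+1)) = pvS a b c d x0 x1 (m+1)
    have h1 : pvS a b c d x0 x1 (2*m+3)
        = (pvF a b c d)^[m+2] (pvS a b c d x0 x1 (m+1)) := by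
      rw [pvS_shift a b c d x0 x1 (2*m+3) (m+1) (by omega),
        show 2*m+3-(m+1) = m+2 by omega]
    rw [← h1]
    exact hm2.symm
  have hmemm : pvS a b c d x0 x1 (m+1) ∈ Function.periodicPts (pvF a b c d) :=
    Function.mk_mem_periodicPts (by omega) hperm
  have hmpm : Function.minimalPeriod (pvF a b c d) (pvS a b c d x0 x1 (m+1))
      = Function.minimalPeriod (pvF a b c d) (pvS a b c d x0 x1 μ) :=
    mp_orbit a b c d x0 x1 (m+1) μ hmemm hμmem
  have hc := count_ok a b c d x0 x1 (m+1) hmemm pvFuel 0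
    (by intro i h1 h2; omega)
    (by
      rw [hmpm]
      have hfb : (2:Nat)^64 ≤ pvFuel := by
        unfold pvFuel
        norm_num
      omega)
  rw [hmpm] at hc
  norm_num at hc
  -- hc : countLoop pvFuel (pvS (m+1)) (pvTrip (pvS (m+1))) 1 = Λ
  have hA : findhardlp a b c d x0 x1
      = ((Function.minimalPeriod (pvF a b c d) (pvS a b c d x0 x1 μ) : Nat) : Int) := by
    have hxt : (x0, x1, PySem.Int.mod (a*x1 + b*x0 + c) d)
        = pvTrip a b c d (pvS a b c d x0 x1 0) := rfl
    have hyt : ((PySem.Int.mod (a*x1 + b*x0 + c) d,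
          PySem.Int.mod (a*(PySem.Int.mod (a*x1 + b*x0 + c) d) + b*x1 + c) d,
          PySem.Int.mod (a*(PySem.Int.mod (a*(PySem.Int.mod (a*x1 + b*x0 + c) d)
              + b*x1 + c) d) + b*(PySem.Int.mod (a*x1 + b*x0 + c) d) + c) d)
        : Int × Int × Int)
        = pvTrip a b c d (pvS a b c d x0 x1 (2*0+2)) := rfl
    simp only [findhardlp]
    rw [hxt, hyt, hm1]
    have htgt : ((pvTrip a b c d (pvS a b c d x0 x1 m)).2.1,
        (pvTrip a b c d (pvS a b c d x0 x1 m)).2.2) = pvS a b c d x0 x1 (m+1) := by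
      rw [pvS_succ]
      rfl
    have hcur : hardnext (pvTrip a b c d (pvS a b c d x0 x1 m)).1
        (pvTrip a b c d (pvS a b c d x0 x1 m)).2.1
        (pvTrip a b c d (pvS a b c d x0 x1 m)).2.2 a b c d
        = pvTrip a b c d (pvS a b c d x0 x1 (m+1)) := by
      rw [hardnext_trip, ← pvS_succ]
    rw [htgt, hcur]
    exact hc
  rw [hA, hB]
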